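-- pv_equiv track=rewrite | github.com/CRAJKUMARSINGH/Bridge_Slab_Design2 | modules/excel_processor.py | _validate_formula_syntax
-- ===== SOURCE A (Python) =====
-- def _validate_formula_syntax(formula: str) -> bool:
--     """Basic formula syntax validation"""
--     try:
--         # Check for balanced parentheses
--         if formula.count('(') != formula.count(')'):
--             return False
--
--         # Check for valid Excel formula start
--         if not formula.startswith('='):
--             return False
--
--         # Check for invalid characters
--         invalid_chars = ['#', '@', '&', '|']
--         if any(char in formula for char in invalid_chars):
--             return False
--
--         return True
--
--     except Exception:
--         return False
-- ===== SOURCE B (Python) =====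
-- def _validate_formula_syntax(formula: str) -> bool:
--     """Basic formula syntax validation (single pass over the characters)."""
--     try:
--         balance = 0
--         saw_invalid = False
--         for ch in formula:
--             if ch == '(':
--                 balance += 1
--             elif ch == ')':
--                 balance -= 1
--             elif ch in '#@&|':
--                 saw_invalid = True
--         return bool(formula) and formula[0] == '=' and balance == 0 and not saw_invalid
--     except Exception:
--         return False
-- ===== Notes on version B (the rewrite author's own statement) =====
-- stated objective: alternative
-- what changed: Replaces three separate string scans (two counts, a startswith, and a per-character substring search) with one single pass over the characters maintaining a paren balance and an invalid-character flag.
import Mathlib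
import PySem

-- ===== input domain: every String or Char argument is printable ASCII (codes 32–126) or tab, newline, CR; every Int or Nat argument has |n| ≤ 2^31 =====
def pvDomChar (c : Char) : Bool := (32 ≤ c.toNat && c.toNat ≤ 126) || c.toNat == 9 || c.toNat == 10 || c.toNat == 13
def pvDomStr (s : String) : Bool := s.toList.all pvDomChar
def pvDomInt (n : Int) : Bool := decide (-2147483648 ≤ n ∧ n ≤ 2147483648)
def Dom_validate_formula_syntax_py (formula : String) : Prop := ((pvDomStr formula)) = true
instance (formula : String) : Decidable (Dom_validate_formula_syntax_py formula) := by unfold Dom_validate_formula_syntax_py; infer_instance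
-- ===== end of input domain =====

-- B changes the decomposition: one single pass maintaining a paren balance and an
-- invalid-char flag, instead of A's separate count/startswith/substring-search scans.

-- ===== PORT A =====
def validate_formula_syntax_py (formula : String) : Bool :=
  if PySem.Str.count formula "(" ≠ PySem.Str.count formula ")" then false
  else if !(PySem.Str.startswith formula "=") then false
  else if (["#", "@", "&", "|"]).any (fun ch => PySem.Str.isIn ch formula) then false
  else true

-- ===== PORT B =====
def pvStep (st : Int × Bool) (ch : Char) : Int × Bool :=
  if ch = '(' then (st.1 + 1, st.2)
  else if ch = ')' then (st.1 - 1, st.2)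
  else if ch = '#' ∨ ch = '@' ∨ ch = '&' ∨ ch = '|' then (st.1, true)
  else st

def validate_formula_syntax_py_alt (formula : String) : Bool :=
  let st := formula.toList.foldl pvStep (0, false)
  match formula.toList with
  | [] => false
  | c :: _ => (c == '=') && (st.1 == 0) && !st.2

-- ===== PRECONDITION & SPEC =====
def Spec_validate_formula_syntax_py (formula : String) (out : Bool) : Prop := out = validate_formula_syntax_py_alt formula
instance (formula : String) (out : Bool) : Decidable (Spec_validate_formula_syntax_py formula out) := by unfold Spec_validate_formula_syntax_py; infer_instance

-- ===== CLAIM (what is proved, stated in full; the proofs are below) =====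
def Claim_equal_validate_formula_syntax_py : Prop := ∀ (formula : String), Dom_validate_formula_syntax_py formula → Spec_validate_formula_syntax_py formula (validate_formula_syntax_py formula)

-- ===== LEMMAS AND PROOFS =====

def pvInv (c : Char) : Bool := c == '#' || c == '@' || c == '&' || c == '|'

theorem pvFold_eq (l : List Char) : ∀ (a : Int) (b : Bool),
    l.foldl pvStep (a, b) = (a + l.count '(' - l.count ')', b || l.any pvInv) := by
  induction l with
  | nil => intro a b; simp
  | cons c t ih =>
    intro a b
    simp only [List.foldl_cons, List.count_cons, List.any_cons]
    by_cases h1 : c = '('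
    · subst h1; simp [pvStep, pvInv, ih]; ring
    · by_cases h2 : c = ')'
      · subst h2; simp [pvStep, pvInv, ih]; ring
      · by_cases h3 : c = '#' ∨ c = '@' ∨ c = '&' ∨ c = '|'
        · have hpc : pvInv c = true := by
            rcases h3 with h | h | h | h <;> simp [pvInv, h]
          simp [pvStep, h1, h2, h3, ih, hpc]
        · have hpc : pvInv c = false := by
            simp only [pvInv]
            rw [not_or, not_or, not_or] at h3
            simp [h3.1, h3.2.1, h3.2.2.1, h3.2.2.2]
          simp [pvStep, h3, ih, hpc]
          simp [h1, h2]

theorem pvCount_go_single (c : Char) : ∀ (l : List Char) (fuel acc : Nat), l.length ≤ fuel →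
    PySem.Chars.count.go [c] fuel l acc = acc + l.count c := by
  intro l
  induction l with
  | nil => intro fuel acc _; cases fuel <;> simp [PySem.Chars.count.go]
  | cons h t ih =>
    intro fuel acc hle
    cases fuel with
    | zero => simp at hle
    | succ f =>
      have hlen : t.length ≤ f := by simpa using hle
      by_cases hc : c = h
      · subst hc
        simp [PySem.Chars.count.go, List.isPrefixOf, ih f (acc + 1) hlen]
        omega
      · have hch : ¬ h = c := fun e => hc e.symm
        have hpre : List.isPrefixOf [c] (h :: t) = false := by
          simp [List.isPrefixOf]
          exact fun e => hc e
        simp [PySem.Chars.count.go, hpre, ih f acc hlen, hch]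

theorem pvCount_single (s : List Char) (c : Char) : PySem.Chars.count s [c] = s.count c := by
  simpa using pvCount_go_single c s s.length 0 le_rfl

-- ===== VERDICT (by name: the statement is the Claim_ definition above) =====
theorem validate_formula_syntax_py_spec : Claim_equal_validate_formula_syntax_py := by
  intro formula _
  unfold Spec_validate_formula_syntax_py validate_formula_syntax_py validate_formula_syntax_py_alt
  have hc1 : PySem.Str.count formula "(" = formula.toList.count '(' := by
    rw [PySem.Str.count_eq]; exact pvCount_single _ _
  have hc2 : PySem.Str.count formula ")" = formula.toList.count ')' := by
    rw [PySem.Str.count_eq]; exact pvCount_single _ _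
  have hin : ∀ ch : Char, PySem.Chars.isIn [ch] formula.toList = formula.toList.contains ch := by
    intro ch
    apply Bool.eq_iff_iff.mpr
    simp [PySem.Chars.isIn_iff_infix, List.singleton_infix_iff]
  rw [pvFold_eq]
  rcases hl : formula.toList with _ | ⟨c, t⟩
  · simp [PySem.Str.startswith, PySem.Chars.startswith, hl]
  · have hsw : PySem.Str.startswith formula "=" = (c == '=') := by
      simp [PySem.Str.startswith, PySem.Chars.startswith, hl, List.isPrefixOf, eq_comm]
    have hany : (["#", "@", "&", "|"]).any (fun ch => PySem.Str.isIn ch formula)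
        = (c :: t).any pvInv := by
      simp only [List.any_cons, List.any_nil, Bool.or_false, PySem.Str.isIn]
      rw [show ("#" : String).toList = ['#'] from rfl, show ("@" : String).toList = ['@'] from rfl,
          show ("&" : String).toList = ['&'] from rfl, show ("|" : String).toList = ['|'] from rfl,
          hin '#', hin '@', hin '&', hin '|', hl]
      apply Bool.eq_iff_iff.mpr
      simp only [Bool.or_eq_true, List.contains_eq_mem, List.any_eq_true, decide_eq_true_eq, pvInv, beq_iff_eq]
      constructor
      · rintro (h | h | h | h) <;> rcases h with h | h <;> aesop
      · rintro (h | ⟨x, hx, h⟩) <;> aesop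
    rw [hc1, hc2, hsw, hany, hl]
    have hbal : ((0 + (↑(List.count '(' (c :: t)) : Int) - ↑(List.count ')' (c :: t))) == 0)
        = decide (List.count '(' (c :: t) = List.count ')' (c :: t)) := by
      apply Bool.eq_iff_iff.mpr
      simp; omega
    simp only [hbal, Bool.false_or]
    split_ifs with h1 h2 h3 <;> simp_all <;>
      first
        | rfl
        | (intro _
           rcases hany with h | h | h | h
           exacts [⟨'#', h, by decide⟩, ⟨'@', h, by decide⟩, ⟨'&', h, by decide⟩, ⟨'|', h, by decide⟩])
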